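-- pv_equiv track=rewrite | github.com/tllc46/Python_scripts | rdmseed.py | nibble_split
-- ===== SOURCE A (Python) =====
-- def nibble_split(binary):
--     nibbles=[]
--     nibbles.append(binary&3)
--     for i in range(15):
--         binary>>=2
--         nibbles.append(binary&3)
--     nibbles.reverse()
--     return nibbles
-- ===== SOURCE B (Python) =====
-- def nibble_split(binary):
--     # Interpret the input as an unsigned 32-bit word, then emit the sixteen
--     # 2-bit digits most-significant first by repeated divmod with decreasing
--     # powers of 4 (pure base-4 arithmetic: no bit operations, no reverse).
--     v = binary % (1 << 32)
--     nibbles = []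
--     for i in range(15, -1, -1):
--         q, v = divmod(v, 4 ** i)
--         nibbles.append(q)
--     return nibbles
-- ===== Notes on version B (the rewrite author's own statement) =====
-- stated objective: alternative
-- what changed: Replaces A's bitwise shift-register (append low nibbles while right-shifting, then reverse) with pure base-4 arithmetic: reduce the input to an unsigned 32-bit word with one modulo, then peel the sixteen digits most-significant first by divmod with decreasing powers of 4 - no bit operations and no reversal.
import Mathlib
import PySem

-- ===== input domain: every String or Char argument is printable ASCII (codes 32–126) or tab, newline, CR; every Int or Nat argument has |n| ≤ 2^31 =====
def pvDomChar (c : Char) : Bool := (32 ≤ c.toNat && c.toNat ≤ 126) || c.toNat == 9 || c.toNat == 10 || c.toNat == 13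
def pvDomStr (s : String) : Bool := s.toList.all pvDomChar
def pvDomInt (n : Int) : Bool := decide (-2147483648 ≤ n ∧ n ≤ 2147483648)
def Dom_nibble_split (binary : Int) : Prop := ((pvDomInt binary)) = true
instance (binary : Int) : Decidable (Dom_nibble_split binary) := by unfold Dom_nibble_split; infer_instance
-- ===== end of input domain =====

-- B replaces A's bitwise shift-register-and-reverse with base-4 arithmetic
-- (one modulo to an unsigned 32-bit word, then divmod by decreasing powers of 4,
-- most-significant digit first); objective: alternative, same values proved equal.

-- ===== PORT A =====
-- A: running shift register, nibbles appended low-to-high, then reversed.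
def nibble_split (binary : Int) : List Int :=
  let nibbles : List Int := []
  let nibbles := nibbles ++ [PySem.Int.band binary 3]
  let st := (PySem.List.pyRange 0 15 1).foldl
    (fun (st : Int × List Int) (_i : Int) =>
      let binary := st.1 >>> (2 : Nat)
      (binary, st.2 ++ [PySem.Int.band binary 3]))
    (binary, nibbles)
  st.2.reverse

-- ===== PORT B =====
-- B: reduce the input to an unsigned 32-bit word, then peel the sixteen base-4
-- digits most-significant first by divmod with decreasing powers of 4.
-- (Python's divmod(v, 4**i) has a nonzero divisor here, so it is ported as
-- floordiv/mod, which are exact for nonzero divisors.)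
def nibble_split_alt (binary : Int) : List Int :=
  let v : Int := PySem.Int.mod binary (1 <<< (32 : Nat))
  let nibbles : List Int := []
  let st := (PySem.List.pyRange 15 (-1) (-1)).foldl
    (fun (st : Int × List Int) (i : Int) =>
      let q := PySem.Int.floordiv st.1 ((4 : Int) ^ i.toNat)
      let v := PySem.Int.mod st.1 ((4 : Int) ^ i.toNat)
      (v, st.2 ++ [q]))
    (v, nibbles)
  st.2

-- ===== PRECONDITION & SPEC =====
def Spec_nibble_split (binary : Int) (out : List Int) : Prop := out = nibble_split_alt binary
instance (binary : Int) (out : List Int) : Decidable (Spec_nibble_split binary out) := by unfold Spec_nibble_split; infer_instance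

-- ===== CLAIM (what is proved, stated in full; the proofs are below) =====
def Claim_equal_nibble_split : Prop := ∀ (binary : Int), Dom_nibble_split binary → Spec_nibble_split binary (nibble_split binary)

-- ===== LEMMAS AND PROOFS =====
-- Python's  x & 3  is  x % 4  (for every Int, Python/floor semantics).
theorem band_three_eq_emod_four (x : Int) : PySem.Int.band x 3 = x % 4 := by
  have h1 := Nat.and_two_pow_sub_one_eq_mod x.toNat 2
  have h2 := Nat.and_two_pow_sub_one_eq_mod (-x - 1).toNat 2
  norm_num at h1 h2
  simp only [PySem.Int.band, show (3 : Int).toNat = 3 from rfl]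
  norm_num
  split_ifs with h
  · rw [h1]; omega
  · rw [Nat.land_comm, h2]; omega

theorem pyRange_A_eval :
    PySem.List.pyRange 0 15 1 = [0,1,2,3,4,5,6,7,8,9,10,11,12,13,14] := by decide

theorem pyRange_B_eval :
    PySem.List.pyRange 15 (-1) (-1) = [15,14,13,12,11,10,9,8,7,6,5,4,3,2,1,0] := by decide

theorem one_shl_32 : (((1 <<< 32 : Nat) : Int)) = 4294967296 := by decide

-- ===== VERDICT (by name: the statement is the Claim_ definition above) =====
theorem nibble_split_spec : Claim_equal_nibble_split := by
  intro binary _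
  show nibble_split binary = nibble_split_alt binary
  simp only [nibble_split, nibble_split_alt, pyRange_A_eval, pyRange_B_eval,
    List.foldl, List.reverse, List.reverseAux, List.nil_append, List.cons_append,
    band_three_eq_emod_four, Int.shiftRight_eq_div_pow, one_shl_32, Int.reduceToNat]
  norm_num [PySem.Int.floordiv_eq_ediv_of_pos, PySem.Int.mod_eq_emod_of_pos]
  omega
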